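-- pv_equiv track=rewrite | github.com/codesquad-backend-study/algorithm-study | programmers/sully/week45/튜플.py | solution
-- ===== SOURCE A (Python) =====
-- from typing import List
--
-- def solution(s: str) -> List[int]:
--     answer: List[int] = []
--     count_hash = {}
--
--     s = s.replace('{', '').replace('}', '')
--     tmp = list(map(int, s.split(',')))
--     for num in tmp:
--         if num in count_hash:
--             count_hash[num] += 1
--             continue
--
--         count_hash[num] = 1
--
--     # count_hash[x] 즉 hash map의 value를 기준으로 높은 것부터 정렬
--     # 왜냐하면 튜플이란 그 숫자가 많이 존재하는 것부터 나열되니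
--     answer = sorted(count_hash, key=lambda x: count_hash[x], reverse=True)
--
--     return answer
-- ===== SOURCE B (Python) =====
-- from typing import List
--
-- def solution(s: str) -> List[int]:
--     s = s.replace('{', '').replace('}', '')
--     tmp = list(map(int, s.split(',')))
--     count_hash = {}
--     for num in tmp:
--         if num in count_hash:
--             count_hash[num] += 1
--             continue
--         count_hash[num] = 1
--
--     # bucket sort by frequency: no comparison sort needed
--     maxc = max(count_hash.values())
--     buckets: List[List[int]] = [[] for _ in range(maxc + 1)]
--     for num in count_hash:          # dict insertion order keeps ties stable
--         buckets[count_hash[num]].append(num)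
--
--     answer: List[int] = []
--     for c in range(maxc, 0, -1):
--         answer.extend(buckets[c])
--     return answer
-- ===== Notes on version B (the rewrite author's own statement) =====
-- stated objective: alternative
-- what changed: Replaces A's comparison sort of the distinct numbers by frequency (sorted(..., reverse=True)) with a bucket pass: numbers are appended to buckets indexed by their count in dict-insertion order and the buckets are read from the maximum count down, reproducing the stable descending order without a comparison sort.
import Mathlib
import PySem

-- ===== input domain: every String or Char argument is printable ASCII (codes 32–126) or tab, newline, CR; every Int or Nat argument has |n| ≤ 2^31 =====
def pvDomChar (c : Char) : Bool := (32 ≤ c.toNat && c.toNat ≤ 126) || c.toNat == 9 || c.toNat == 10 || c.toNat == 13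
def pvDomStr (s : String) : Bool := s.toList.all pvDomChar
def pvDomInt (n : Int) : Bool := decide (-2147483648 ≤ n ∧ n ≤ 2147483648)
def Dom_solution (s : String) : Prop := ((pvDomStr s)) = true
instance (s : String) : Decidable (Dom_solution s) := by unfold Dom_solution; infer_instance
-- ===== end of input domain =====

-- B replaces A's comparison sort (sorted by count, reverse=True) by a frequency bucket pass:
-- counts into buckets indexed by frequency and reads them from the maximum count down, which
-- reproduces the stable descending order without comparing elements.

-- ===== PORT A =====
def solution (s : String) : List Int :=
  let s1 := PySem.Str.replace (PySem.Str.replace s "{" "") "}" ""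
  match ((PySem.Str.split? s1 ",").getD []).mapM PySem.Int.ofStr? with
  | none => []    -- int() raised ValueError: excluded by Pre_solution
  | some tmp =>
    let count_hash := tmp.foldl
      (fun d num => if d.contains num then d.modify num 0 (· + 1) else d.insert num 1)
      (PySem.Dict.empty : PySem.Dict Int Int)
    PySem.List.sorted count_hash.keys (fun x => count_hash.getD x 0) true

-- ===== PORT B =====
def solution_alt (s : String) : List Int :=
  let s1 := PySem.Str.replace (PySem.Str.replace s "{" "") "}" ""
  match ((PySem.Str.split? s1 ",").getD []).mapM PySem.Int.ofStr? with
  | none => []    -- int() raised ValueError: excluded by Pre_solution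
  | some tmp =>
    let count_hash := tmp.foldl
      (fun d num => if d.contains num then d.modify num 0 (· + 1) else d.insert num 1)
      (PySem.Dict.empty : PySem.Dict Int Int)
    match PySem.List.max? count_hash.values (fun v => v) with
    | none => []  -- max() on an empty dict: unreachable, split always yields a token
    | some maxc =>
      let buckets := count_hash.keys.foldl
        (fun (bs : List (List Int)) num =>
          bs.set (count_hash.getD num 0).toNat
            (bs.getD (count_hash.getD num 0).toNat [] ++ [num]))
        (List.replicate (maxc + 1).toNat [])
      (PySem.List.pyRange maxc 0 (-1)).foldl (fun acc c => acc ++ buckets.getD c.toNat []) []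

-- ===== PRECONDITION & SPEC =====
-- Pre_ excludes exactly the strings on which int() raises ValueError (a comma-separated
-- token of the brace-stripped string is not an integer literal); A raises there.
def Pre_solution (s : String) : Prop :=
  ∀ t ∈ (PySem.Str.split? (PySem.Str.replace (PySem.Str.replace s "{" "") "}" "") ",").getD [],
    (PySem.Int.ofStr? t).isSome = true
instance (s : String) : Decidable (Pre_solution s) := by unfold Pre_solution; infer_instance

def pvWitness_solution : String := "{{2},{2,1},{2,1,3}}"

def Spec_solution (s : String) (out : List Int) : Prop := out = solution_alt s
instance (s : String) (out : List Int) : Decidable (Spec_solution s out) := by unfold Spec_solution; infer_instance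

-- ===== CLAIM (what is proved, stated in full; the proofs are below) =====
def Claim_equal_solution : Prop := ∀ (s : String), Dom_solution s → Pre_solution s → Spec_solution s (solution s)

-- ===== LEMMAS AND PROOFS =====

-- insertBy unfolds on a cons cell
theorem insertBy_cons {α : Type} (before : α → α → Bool) (x y : α) (ys : List α) :
    PySem.List.insertBy before x (y :: ys) =
      if before x y then x :: y :: ys else y :: PySem.List.insertBy before x ys := by
  simp [PySem.List.insertBy]

-- insertBy walks past a prefix it does not insert into
theorem insertBy_skip {α : Type} (before : α → α → Bool) (x : α) (l r : List α)
    (h : ∀ y ∈ l, before x y = false) :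
    PySem.List.insertBy before x (l ++ r) = l ++ PySem.List.insertBy before x r := by
  induction l with
  | nil => simp
  | cons y l ih =>
    rw [List.cons_append, insertBy_cons, if_neg, ih fun z hz => h z (List.mem_cons_of_mem _ hz),
      List.cons_append]
    simp [h y List.mem_cons_self]

-- insertBy inserts at the front when it goes before everything
theorem insertBy_front {α : Type} (before : α → α → Bool) (x : α) (r : List α)
    (h : ∀ y ∈ r, before x y = true) :
    PySem.List.insertBy before x r = x :: r := by
  cases r with
  | nil => simp [PySem.List.insertBy]
  | cons y ys => simp [insertBy_cons, h y List.mem_cons_self]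

-- inserting into a bucket decomposition lands at the end of its own bucket
theorem insertBy_flatMap (key : Int → Int) (k : Int) (vs : List Int) (F : Int → List Int)
    (hs : vs.Pairwise (· > ·)) (hF : ∀ v ∈ vs, ∀ a ∈ F v, key a = v) (hw : key k ∈ vs) :
    PySem.List.insertBy (fun a b => decide (key b < key a)) k (vs.flatMap F) =
      vs.flatMap (fun v => if v = key k then F v ++ [k] else F v) := by
  induction vs with
  | nil => simp at hw
  | cons v vs ih =>
    have hv : ∀ u ∈ vs, v > u := (List.pairwise_cons.mp hs).1
    have hs' := (List.pairwise_cons.mp hs).2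
    by_cases hkv : v = key k
    · -- insert after bucket v, before everything below
      have h1 : ∀ y ∈ F v, (fun a b => decide (key b < key a)) k y = false := by
        intro y hy
        have := hF v (List.mem_cons_self) y hy
        simp [this, hkv]
      have h2 : ∀ y ∈ vs.flatMap F, (fun a b => decide (key b < key a)) k y = true := by
        intro y hy
        obtain ⟨u, hu, hyu⟩ := List.mem_flatMap.mp hy
        have : key y = u := hF u (List.mem_cons_of_mem _ hu) y hyu
        have : key y < v := by rw [this]; exact hv u hu
        simp; omega
      have hnot : ∀ u ∈ vs, ¬ (u = key k) := by
        intro u hu h; have := hv u hu; omega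
      rw [List.flatMap_cons, List.flatMap_cons, insertBy_skip _ _ _ _ h1,
        insertBy_front _ _ _ h2, if_pos hkv]
      have : (vs.flatMap fun v => if v = key k then F v ++ [k] else F v) = vs.flatMap F := by
        apply List.flatMap_congr
        intro u hu; rw [if_neg (hnot u hu)]
      rw [this]
      simp
    · -- key k lies strictly below v: skip bucket v entirely
      have hw' : key k ∈ vs := by
        cases List.mem_cons.mp hw with
        | inl h => exact absurd h.symm hkv
        | inr h => exact h
      have hlt : key k < v := hv _ hw'
      have h1 : ∀ y ∈ F v, (fun a b => decide (key b < key a)) k y = false := by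
        intro y hy
        have := hF v (List.mem_cons_self) y hy
        simp [this]; omega
      rw [List.flatMap_cons, List.flatMap_cons, insertBy_skip _ _ _ _ h1,
        ih hs' (fun u hu => hF u (List.mem_cons_of_mem _ hu)) hw', if_neg hkv]

-- stable reverse sort by key = buckets read in strictly decreasing key order
theorem sorted_rev_eq_flatMap_filter (key : Int → Int) (ks vs : List Int)
    (hs : vs.Pairwise (· > ·)) (hmem : ∀ k ∈ ks, key k ∈ vs) :
    PySem.List.sorted ks key true =
      vs.flatMap (fun v => ks.filter (fun k => key k == v)) := by
  induction ks using List.reverseRecOn with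
  | nil => simp [PySem.List.sorted]
  | append_singleton ks k ih =>
    rw [PySem.List.sorted_rev_eq_foldl_insertBy, List.foldl_append,
      ← PySem.List.sorted_rev_eq_foldl_insertBy,
      ih (fun x hx => hmem x (List.mem_append_left _ hx)), List.foldl_cons, List.foldl_nil,
      insertBy_flatMap key k vs _ hs
        (fun v _ a ha => by
          have := List.of_mem_filter ha
          simpa using this)
        (hmem k (List.mem_append_right _ List.mem_cons_self))]
    apply List.flatMap_congr
    intro v hv
    rw [List.filter_append]
    by_cases h : v = key k
    · simp [h]
    · rw [if_neg h]
      have hb : (key k == v) = false := by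
        simp only [beq_eq_false_iff_ne, Ne]
        exact fun hh => h hh.symm
      simp [List.filter, hb]

-- the bucket-filling loop computes the filters
theorem bucket_fold_getD (ks : List Int) (f : Int → Nat) (bs0 : List (List Int))
    (hb : ∀ k ∈ ks, f k < bs0.length) (i : Nat) :
    (ks.foldl (fun bs k => bs.set (f k) (bs.getD (f k) [] ++ [k])) bs0).getD i [] =
      bs0.getD i [] ++ ks.filter (fun k => f k == i) := by
  induction ks generalizing bs0 with
  | nil => simp
  | cons k ks ih =>
    have hk : f k < bs0.length := hb k List.mem_cons_self
    rw [List.foldl_cons, ih _ (by simpa using fun z hz => hb z (List.mem_cons_of_mem _ hz))]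
    by_cases h : f k = i
    · subst h
      rw [List.getD_eq_getElem?_getD, List.getElem?_set_self hk]
      simp
    · rw [List.getD_eq_getElem?_getD, List.getElem?_set_ne h, ← List.getD_eq_getElem?_getD,
        List.filter_cons]
      have : (f k == i) = false := by simpa using h
      simp [this]

-- A's branching count loop is Counter
theorem countfold_eq (l : List Int) :
    l.foldl (fun d num => if d.contains num then d.modify num 0 (· + 1) else d.insert num 1)
      (PySem.Dict.empty : PySem.Dict Int Int) = PySem.Dict.counter l := by
  rw [PySem.Dict.counter_eq_foldl]
  congr 1
  funext d num
  by_cases h : d.contains num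
  · simp [h]
  · have hg : d.getD num 0 = 0 := PySem.Dict.getD_of_not_contains _ _ (by simpa using h)
    simp [h, PySem.Dict.modify, hg]

-- ===== VERDICT (by name: the statement is the Claim_ definition above) =====
-- a list of all-parseable tokens maps to some
theorem mapM_isSome_of_all (l : List String)
    (h : ∀ t ∈ l, (PySem.Int.ofStr? t).isSome = true) :
    (l.mapM PySem.Int.ofStr?).isSome = true := by
  induction l with
  | nil => simp
  | cons x l ih =>
    obtain ⟨v, hv⟩ := Option.isSome_iff_exists.mp (h x List.mem_cons_self)
    have := ih fun t ht => h t (List.mem_cons_of_mem _ ht)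
    obtain ⟨w, hw⟩ := Option.isSome_iff_exists.mp this
    simp [List.mapM_cons, hv, hw]

theorem solution_spec : Claim_equal_solution := by
  unfold Claim_equal_solution Spec_solution
  intro s _ hpre
  simp only [solution, solution_alt]
  cases hm : ((PySem.Str.split? (PySem.Str.replace (PySem.Str.replace s "{" "") "}" "") ",").getD []).mapM PySem.Int.ofStr? with
  | none =>
    -- Pre_solution rules this branch out: every token parses
    have := mapM_isSome_of_all _ hpre
    rw [hm] at this
  | some tmp =>
    dsimp only
    rw [countfold_eq]
    cases hmax : PySem.List.max? (PySem.Dict.counter tmp).values (fun v => v) with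
    | none =>
      have hnil : (PySem.Dict.counter tmp).values = [] :=
        (PySem.List.max?_eq_none_iff _ _).mp hmax
      have hkeys : (PySem.Dict.counter tmp).keys = [] := by
        simp only [PySem.Dict.values, List.map_eq_nil_iff] at hnil
        simp [PySem.Dict.keys, hnil]
      rw [hkeys]
      simp [PySem.List.sorted]
    | some maxc =>
      dsimp only
      have hnd := PySem.Dict.nodup_keys_counter tmp
      have h1 : ∀ k ∈ (PySem.Dict.counter tmp).keys, 1 ≤ (PySem.Dict.counter tmp).getD k 0 := by
        intro k hk
        rw [PySem.Dict.keys_counter, PySem.Set.mem_ofList] at hk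
        rw [PySem.Dict.getD_counter]
        have := List.count_pos_iff.mpr hk
        omega
      have hvals := PySem.Dict.values_eq_map_keys (PySem.Dict.counter tmp) hnd 0
      have h2 : ∀ k ∈ (PySem.Dict.counter tmp).keys, (PySem.Dict.counter tmp).getD k 0 ≤ maxc := by
        intro k hk
        have hmemv : (PySem.Dict.counter tmp).getD k 0 ∈ (PySem.Dict.counter tmp).values := by
          rw [hvals]; exact List.mem_map_of_mem hk
        exact PySem.List.max?_isMax hmax _ hmemv
      have hmaxmem : maxc ∈ (PySem.Dict.counter tmp).values := PySem.List.max?_mem hmax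
      have hmax1 : 1 ≤ maxc := by
        rw [hvals] at hmaxmem
        obtain ⟨k, hk, hkv⟩ := List.mem_map.mp hmaxmem
        rw [← hkv]; exact h1 k hk
      -- A side: the stable reverse sort is the bucket decomposition over maxc, maxc-1, …, 1
      have hA := sorted_rev_eq_flatMap_filter (fun x => (PySem.Dict.counter tmp).getD x 0)
        (PySem.Dict.counter tmp).keys (PySem.List.pyRange maxc 0 (-1))
        (by
          rw [PySem.List.pyRange_neg_one_eq_reverse, List.pairwise_reverse]
          exact (PySem.List.pairwise_lt_pyRange_one (0 + 1) (maxc + 1)))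
        (by
          intro k hk
          rw [PySem.List.mem_pyRange_neg_one]
          show 0 < (PySem.Dict.counter tmp).getD k 0 ∧ (PySem.Dict.counter tmp).getD k 0 ≤ maxc
          exact ⟨by have := h1 k hk; omega, h2 k hk⟩)
      rw [hA, PySem.List.foldl_append_eq_flatMap, List.nil_append]
      -- B side: each bucket read back is the corresponding filter
      apply List.flatMap_congr
      intro c hc
      rw [PySem.List.mem_pyRange_neg_one] at hc
      rw [bucket_fold_getD _ (fun num => ((PySem.Dict.counter tmp).getD num 0).toNat) _
        (by
          intro k hk
          show ((PySem.Dict.counter tmp).getD k 0).toNat <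
            (List.replicate (maxc + 1).toNat ([] : List Int)).length
          rw [List.length_replicate]
          have := h1 k hk; have := h2 k hk
          omega)]
      have hrep : (List.replicate (maxc + 1).toNat ([] : List Int)).getD c.toNat [] = [] := by
        rw [List.getD_eq_getElem?_getD]
        cases h : (List.replicate (maxc + 1).toNat ([] : List Int))[c.toNat]? with
        | none => rfl
        | some x =>
          have := List.mem_of_getElem? h
          simp only [List.mem_replicate] at this
          simp [this.2]
      rw [hrep, List.nil_append]
      apply List.filter_congr
      intro k hk
      have hk1 := h1 k hk
      show ((PySem.Dict.counter tmp).getD k 0 == c) =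
        (((PySem.Dict.counter tmp).getD k 0).toNat == c.toNat)
      by_cases h : (PySem.Dict.counter tmp).getD k 0 = c
      · simp [h]
      · have : ((PySem.Dict.counter tmp).getD k 0).toNat ≠ c.toNat := by omega
        rw [Bool.eq_iff_iff]
        simp only [beq_iff_eq, PySem.Dict.getD_counter] at *
        omega
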